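-- pv_equiv track=rewrite | github.com/sariburak/SudokuHelper | solver.py | isSameRow
-- ===== SOURCE A (Python) =====
-- def isSameRow(coordinates):
--     if len(coordinates) == 0:
--         return True
--
--     row = coordinates[0][0]
--
--     for coordinate in coordinates:
--         if row != coordinate[0]:
--             return False
--
--     return True
-- ===== SOURCE B (Python) =====
-- def isSameRow(coordinates):
--     rows = [c[0] for c in coordinates]
--     return rows == [] or min(rows) == max(rows)
-- ===== Notes on version B (the rewrite author's own statement) =====
-- stated objective: alternative
-- what changed: Replaced the reference-value early-exit scan with an extremal-value formulation: project out the rows once and test that their minimum equals their maximum.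
import Mathlib
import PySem

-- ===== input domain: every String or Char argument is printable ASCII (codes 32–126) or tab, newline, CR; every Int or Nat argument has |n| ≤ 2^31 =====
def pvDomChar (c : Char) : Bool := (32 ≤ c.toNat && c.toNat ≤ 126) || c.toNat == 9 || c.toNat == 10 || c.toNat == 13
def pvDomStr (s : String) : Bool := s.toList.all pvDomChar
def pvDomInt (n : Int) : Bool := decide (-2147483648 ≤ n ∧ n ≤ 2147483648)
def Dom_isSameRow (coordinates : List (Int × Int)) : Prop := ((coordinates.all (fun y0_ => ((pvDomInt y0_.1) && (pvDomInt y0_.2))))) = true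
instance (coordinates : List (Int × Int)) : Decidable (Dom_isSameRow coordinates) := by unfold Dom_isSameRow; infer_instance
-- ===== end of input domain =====

-- B replaces A's reference-value early-exit scan with an extremal-value test: min(rows) == max(rows) (alternative, same cost).

-- ===== PORT A =====
-- the 'for coordinate in coordinates' loop with early 'return False'
def isSameRowLoop (row : Int) : List (Int × Int) → Bool
  | [] => true
  | coordinate :: rest => if row ≠ coordinate.1 then false else isSameRowLoop row rest

def isSameRow (coordinates : List (Int × Int)) : Bool :=
  match coordinates with
  | [] => true
  | c0 :: _ => isSameRowLoop c0.1 coordinates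

-- ===== PORT B =====
-- 'rows == [] or min(rows) == max(rows)': the 'or' short-circuits, so min/max are only taken on a nonempty list
def isSameRow_alt (coordinates : List (Int × Int)) : Bool :=
  let rows := coordinates.map Prod.fst
  if rows = [] then true
  else PySem.List.min? rows (fun x => x) == PySem.List.max? rows (fun x => x)

-- ===== PRECONDITION & SPEC =====
def Spec_isSameRow (coordinates : List (Int × Int)) (out : Bool) : Prop := out = isSameRow_alt coordinates
instance (coordinates : List (Int × Int)) (out : Bool) : Decidable (Spec_isSameRow coordinates out) := by unfold Spec_isSameRow; infer_instance

-- ===== CLAIM (what is proved, stated in full; the proofs are below) =====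
def Claim_equal_isSameRow : Prop := ∀ (coordinates : List (Int × Int)), Dom_isSameRow coordinates → Spec_isSameRow coordinates (isSameRow coordinates)

-- ===== LEMMAS AND PROOFS =====
theorem isSameRowLoop_eq_true_iff (row : Int) (l : List (Int × Int)) :
    isSameRowLoop row l = true ↔ ∀ c ∈ l, c.1 = row := by
  induction l with
  | nil => simp [isSameRowLoop]
  | cons c rest ih =>
    by_cases h : row = c.1
    · subst h
      simp only [isSameRowLoop]
      rw [if_neg (by simp)]
      constructor
      · intro hl d hd
        rcases List.mem_cons.mp hd with rfl | hm
        · rfl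
        · exact ih.mp hl d hm
      · intro hall; exact ih.mpr fun d hd => hall d (List.mem_cons_of_mem _ hd)
    · simp only [isSameRowLoop, if_pos h]
      constructor
      · intro hf; cases hf
      · intro hall; exact absurd (hall c (List.mem_cons_self ..)).symm h

theorem min_eq_max_iff (rows : List Int) (hne : rows ≠ []) (a : Int) (ha : a ∈ rows) :
    (PySem.List.min? rows (fun x => x) = PySem.List.max? rows (fun x => x)) ↔ ∀ y ∈ rows, y = a := by
  obtain ⟨m, hm⟩ : ∃ m, PySem.List.min? rows (fun x => x) = some m := by
    cases h : PySem.List.min? rows (fun x => x) with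
    | none => exact absurd ((PySem.List.min?_eq_none_iff ..).mp h) hne
    | some m => exact ⟨m, rfl⟩
  obtain ⟨M, hM⟩ : ∃ M, PySem.List.max? rows (fun x => x) = some M := by
    cases h : PySem.List.max? rows (fun x => x) with
    | none => exact absurd ((PySem.List.max?_eq_none_iff ..).mp h) hne
    | some M => exact ⟨M, rfl⟩
  rw [hm, hM]
  constructor
  · intro h y hy
    have h1 := PySem.List.min?_isMin hm y hy
    have h2 := PySem.List.max?_isMax hM y hy
    have h3 := PySem.List.min?_isMin hm a ha
    have h4 := PySem.List.max?_isMax hM a ha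
    simp only [Option.some.injEq] at h
    omega
  · intro hall
    have h1 : m = a := hall m (PySem.List.min?_mem hm)
    have h2 : M = a := hall M (PySem.List.max?_mem hM)
    rw [h1, h2]

-- ===== VERDICT (by name: the statement is the Claim_ definition above) =====
theorem isSameRow_spec : Claim_equal_isSameRow := by
  intro coordinates _
  unfold Spec_isSameRow isSameRow isSameRow_alt
  match coordinates with
  | [] => decide
  | c0 :: rest =>
    have hA := isSameRowLoop_eq_true_iff c0.1 (c0 :: rest)
    have hB := min_eq_max_iff ((c0 :: rest).map Prod.fst) (by simp) c0.1 (by simp)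
    simp only []
    rw [if_neg (by simp)]
    by_cases hp : ∀ c ∈ c0 :: rest, c.1 = c0.1
    · have ha : isSameRowLoop c0.1 (c0 :: rest) = true := hA.mpr hp
      have hb : PySem.List.min? ((c0 :: rest).map Prod.fst) (fun x => x)
              = PySem.List.max? ((c0 :: rest).map Prod.fst) (fun x => x) := by
        apply hB.mpr; intro y hy
        obtain ⟨c, hc, rfl⟩ := List.mem_map.mp hy
        exact hp c hc
      simp only [List.map_cons] at hb
      simp [ha, hb]
    · have ha : isSameRowLoop c0.1 (c0 :: rest) = false := by
        cases hh : isSameRowLoop c0.1 (c0 :: rest)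
        · rfl
        · exact absurd (hA.mp hh) hp
      have hb : PySem.List.min? ((c0 :: rest).map Prod.fst) (fun x => x)
              ≠ PySem.List.max? ((c0 :: rest).map Prod.fst) (fun x => x) := by
        intro heq
        exact hp fun c hc => hB.mp heq c.1 (List.mem_map_of_mem hc)
      simp only [List.map_cons] at hb
      simp [ha, hb]
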